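-- pv_equiv track=rewrite | github.com/kdylsky/codekata | 프로그래머스1단계0-30/codekata16.py | solution
-- ===== SOURCE A (Python) =====
-- import math
--
-- def solution(progresses, speeds):
--     days = [math.ceil((100 - progresses[i]) / speeds[i]) for i in range(len(progresses))]
--
--     max     = days[0]
--     count   = 0
--     anwser  = []
--
--     for i in days:
--         if max >= i :
--             count += 1
--             continue
--         else:
--             max = i
--             anwser.append(count)
--             count = 1
--
--     anwser.append(count)
--     return anwser
-- ===== SOURCE B (Python) =====
-- def solution(progresses, speeds):
--     days = [-((p - 100) // s) for p, s in zip(progresses, speeds)]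
--     answer = []
--     rest = days
--     while rest:
--         lead = rest[0]
--         k = 1
--         while k < len(rest) and rest[k] <= lead:
--             k += 1
--         answer.append(k)
--         rest = rest[k:]
--     return answer
-- ===== Notes on version B (the rewrite author's own statement) =====
-- stated objective: alternative
-- what changed: B drops A's single pass that maintains a running maximum and a flush-and-reset counter; instead it repeatedly splits the days list into groups, each group being its leading element plus the maximal following prefix of elements not exceeding that leader, and emits each group's length; days use exact integer ceiling division instead of float division plus math.ceil.
import Mathlib
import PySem

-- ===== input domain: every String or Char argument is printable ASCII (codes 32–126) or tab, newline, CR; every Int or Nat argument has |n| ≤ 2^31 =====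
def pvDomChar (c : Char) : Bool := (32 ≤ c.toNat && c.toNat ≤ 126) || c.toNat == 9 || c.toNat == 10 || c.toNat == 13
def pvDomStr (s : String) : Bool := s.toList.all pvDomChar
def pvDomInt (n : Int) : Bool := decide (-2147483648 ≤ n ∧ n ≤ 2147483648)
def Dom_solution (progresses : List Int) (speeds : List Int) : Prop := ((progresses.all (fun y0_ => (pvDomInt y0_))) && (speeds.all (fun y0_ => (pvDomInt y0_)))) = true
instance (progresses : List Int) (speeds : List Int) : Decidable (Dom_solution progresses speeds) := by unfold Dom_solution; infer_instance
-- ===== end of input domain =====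

-- B replaces A's running-max/counter pass by group splitting: repeatedly cut the days list
-- at the first element exceeding the current group's leading element (objective: alternative, same cost).


-- ===== PORT A =====
-- math.ceil((100-p)/s): on Dom (|ints| ≤ 2^31) the float division is exact enough that the
-- result equals the exact integer ceiling, ported as -((-(100-p)) // s).
def pyCeilA (p s : Int) : Int := -(PySem.Int.floordiv (-(100 - p)) s)

def solution (progresses : List Int) (speeds : List Int) : List Int :=
  let days := (List.range progresses.length).map (fun (i : Nat) =>
    pyCeilA ((PySem.List.pyGet? progresses (i : Int)).getD 0)
            ((PySem.List.pyGet? speeds (i : Int)).getD 0))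
  match days with
  | [] => []  -- Python raises IndexError at days[0]; excluded by Pre_solution
  | d0 :: _ =>
    let st := days.foldl (fun (st : Int × Int × List Int) i =>
      if st.1 ≥ i then (st.1, st.2.1 + 1, st.2.2)
      else (i, 1, st.2.2 ++ [st.2.1])) (d0, 0, [])
    st.2.2 ++ [st.2.1]

-- ===== PORT B =====
-- the inner 'while k < len(rest) and rest[k] <= lead: k += 1' of Source B: length of the
-- maximal prefix of rest whose elements are ≤ lead, scanned front to back
def pvCountLe (lead : Int) : List Int → Nat
  | [] => 0
  | d :: t => if d ≤ lead then pvCountLe lead t + 1 else 0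

-- Source B's outer 'while rest:' loop, one call per group; state = the remaining suffix 'rest'
def pvGroups : List Int → List Int
  | [] => []
  | lead :: rest =>
    let k := pvCountLe lead rest
    ((1 + k : Nat) : Int) :: pvGroups (rest.drop k)
  termination_by ds => ds.length
  decreasing_by simp [List.length_drop]

def solution_alt (progresses : List Int) (speeds : List Int) : List Int :=
  let days := (progresses.zip speeds).map
    (fun q => -(PySem.Int.floordiv (q.1 - 100) q.2))
  pvGroups days

-- ===== PRECONDITION & SPEC =====
-- Pre_ excludes exactly where Python A raises: empty progresses (IndexError at days[0]),
-- speeds shorter than progresses (IndexError), and a zero speed in the used prefix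
-- (ZeroDivisionError).
def Pre_solution (progresses : List Int) (speeds : List Int) : Prop :=
  progresses ≠ [] ∧ progresses.length ≤ speeds.length ∧
  ∀ x ∈ speeds.take progresses.length, x ≠ 0
instance (progresses : List Int) (speeds : List Int) : Decidable (Pre_solution progresses speeds) := by unfold Pre_solution; infer_instance

def pvWitness_solution : List Int × List Int := ([93, 30, 55], [1, 30, 5])

def Spec_solution (progresses : List Int) (speeds : List Int) (out : List Int) : Prop := out = solution_alt progresses speeds
instance (progresses : List Int) (speeds : List Int) (out : List Int) : Decidable (Spec_solution progresses speeds out) := by unfold Spec_solution; infer_instance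

-- ===== CLAIM (what is proved, stated in full; the proofs are below) =====
def Claim_equal_solution : Prop := ∀ (progresses : List Int) (speeds : List Int), Dom_solution progresses speeds → Pre_solution progresses speeds → Spec_solution progresses speeds (solution progresses speeds)

-- ===== LEMMAS AND PROOFS =====

theorem pvGroups_nil : pvGroups [] = [] := by rw [pvGroups.eq_def]

theorem pvGroups_cons (lead : Int) (rest : List Int) :
    pvGroups (lead :: rest)
      = ((1 + pvCountLe lead rest : Nat) : Int)
          :: pvGroups (rest.drop (pvCountLe lead rest)) := by
  rw [pvGroups.eq_def]

def pvStepA (st : Int × Int × List Int) (i : Int) : Int × Int × List Int :=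
  if st.1 ≥ i then (st.1, st.2.1 + 1, st.2.2) else (i, 1, st.2.2 ++ [st.2.1])

-- A's fold over the remaining list, with the current group leader as the running max,
-- produces the flushed groups so far plus the groups of B's recursive split.
theorem pvMain : ∀ (rest : List Int) (lead count : Int) (ans : List Int),
    (rest.foldl pvStepA (lead, count, ans)).2.2 ++ [(rest.foldl pvStepA (lead, count, ans)).2.1]
      = ans ++ ((count + (pvCountLe lead rest : Int))
                  :: pvGroups (rest.drop (pvCountLe lead rest))) := by
  intro rest
  induction rest with
  | nil => intro lead count ans; simp [pvCountLe, pvGroups_nil]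
  | cons d t ih =>
    intro lead count ans
    by_cases h : d ≤ lead
    · have hA : lead ≥ d := h
      simp only [List.foldl_cons, pvStepA, if_pos hA]
      rw [ih lead (count + 1) ans]
      have hc : pvCountLe lead (d :: t) = pvCountLe lead t + 1 := by
        simp [pvCountLe, h]
      rw [hc]
      have hcast : count + 1 + (pvCountLe lead t : Int)
          = count + ((pvCountLe lead t + 1 : Nat) : Int) := by push_cast; ring
      rw [hcast]
      simp
    · have hA : ¬ lead ≥ d := by omega
      simp only [List.foldl_cons, pvStepA, if_neg hA]
      rw [ih d 1 (ans ++ [count])]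
      have hc : pvCountLe lead (d :: t) = 0 := by simp [pvCountLe, h]
      rw [hc]
      simp only [List.drop_zero, List.append_assoc, List.cons_append, List.nil_append,
        Nat.cast_zero, add_zero]
      rw [pvGroups_cons]
      norm_num

-- the two days lists coincide when speeds is at least as long as progresses
theorem pvDays_eq (progresses speeds : List Int) (h : progresses.length ≤ speeds.length) :
    (List.range progresses.length).map (fun (i : Nat) =>
      pyCeilA ((PySem.List.pyGet? progresses (i : Int)).getD 0)
              ((PySem.List.pyGet? speeds (i : Int)).getD 0))
    = (progresses.zip speeds).map (fun q => -(PySem.Int.floordiv (q.1 - 100) q.2)) := by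
  apply List.ext_getElem
  · simp [Nat.min_eq_left h]
  · intro i h1 h2
    simp only [List.getElem_map, List.getElem_range, List.getElem_zip]
    have hi : i < progresses.length := by simpa using h1
    have hs : i < speeds.length := lt_of_lt_of_le hi h
    rw [PySem.List.pyGet?_natCast, PySem.List.pyGet?_natCast]
    simp only [List.getElem?_eq_getElem hi, List.getElem?_eq_getElem hs, Option.getD_some]
    unfold pyCeilA
    congr 2
    ring

-- ===== VERDICT (by name: the statement is the Claim_ definition above) =====
theorem solution_spec : Claim_equal_solution := by
  intro progresses speeds _ hpre
  unfold Spec_solution solution solution_alt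
  rw [pvDays_eq progresses speeds hpre.2.1]
  set days := (progresses.zip speeds).map (fun q => -(PySem.Int.floordiv (q.1 - 100) q.2))
    with hdays
  cases hd : days with
  | nil =>
    exfalso
    have : progresses = [] := by
      cases progresses with
      | nil => rfl
      | cons a t =>
        cases speeds with
        | nil => exact absurd hpre.2.1 (by simp)
        | cons b u => simp [hdays] at hd
    exact hpre.1 this
  | cons d0 rest =>
    show ((d0 :: rest).foldl pvStepA (d0, 0, [])).2.2
          ++ [((d0 :: rest).foldl pvStepA (d0, 0, [])).2.1] = pvGroups (d0 :: rest)
    have h0 : d0 ≤ d0 := le_refl d0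
    simp only [List.foldl_cons, pvStepA, if_pos (le_refl d0)]
    rw [pvMain rest d0 (0 + 1) []]
    rw [pvGroups_cons]
    norm_num
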